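-- pv_equiv track=rewrite | github.com/MassDynamics/md-python | mcp_tools/files/metadata.py | _sm_column_order
-- ===== SOURCE A (Python) =====
-- from typing import Dict, List, Optional, Set, Tuple
--
-- def _sm_column_order(
--     normalised: List[str], header_stripped: List[str]
-- ) -> Tuple[List[int], List[str]]:
--     """Return (col_indices, headers) for sample_metadata.
--
--     Excludes the 'filename' column. Moves sample_name to position 0 if it
--     isn't already there.
--     """
--     col_indices = [i for i, col in enumerate(normalised) if col != "filename"]
--     headers = [header_stripped[i] for i in col_indices]
--
--     sn_pos = next(
--         (
--             j
--             for j, h in enumerate(headers)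
--             if h.strip().lower() in ("sample_name", "sample", "samplename")
--         ),
--         None,
--     )
--     if sn_pos is not None and sn_pos != 0:
--         col_indices = [col_indices[sn_pos]] + [
--             c for j, c in enumerate(col_indices) if j != sn_pos
--         ]
--         headers = [header_stripped[i] for i in col_indices]
--
--     return col_indices, headers
-- ===== SOURCE B (Python) =====
-- from typing import List, Tuple
--
--
-- def _sm_column_order(
--     normalised: List[str], header_stripped: List[str]
-- ) -> Tuple[List[int], List[str]]:
--     """Single partition pass: skip 'filename' columns; the first
--     sample_name-like column is captured separately, every other kept
--     column goes to `rest` in order; then stitch the result together."""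
--     sn_index = None
--     rest = []
--     for i, col in enumerate(normalised):
--         if col == "filename":
--             continue
--         header = header_stripped[i]
--         if sn_index is None and header.strip().lower() in (
--             "sample_name",
--             "sample",
--             "samplename",
--         ):
--             sn_index = i
--         else:
--             rest.append(i)
--     col_indices = [sn_index] + rest if sn_index is not None else rest
--     headers = [header_stripped[i] for i in col_indices]
--     return col_indices, headers
-- ===== Notes on version B (the rewrite author's own statement) =====
-- stated objective: alternative
-- what changed: A builds the kept-column list, then searches it for the first sample_name header, then rebuilds both lists to move it to the front; B does one partition pass over enumerate(normalised) that captures the first sample_name index separately and collects all other kept indices, then stitches the result together.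
-- outside the precondition, e.g. on _sm_column_order(['a', 'b'], ['x']): A raises IndexError, B raises IndexError
import Mathlib
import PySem

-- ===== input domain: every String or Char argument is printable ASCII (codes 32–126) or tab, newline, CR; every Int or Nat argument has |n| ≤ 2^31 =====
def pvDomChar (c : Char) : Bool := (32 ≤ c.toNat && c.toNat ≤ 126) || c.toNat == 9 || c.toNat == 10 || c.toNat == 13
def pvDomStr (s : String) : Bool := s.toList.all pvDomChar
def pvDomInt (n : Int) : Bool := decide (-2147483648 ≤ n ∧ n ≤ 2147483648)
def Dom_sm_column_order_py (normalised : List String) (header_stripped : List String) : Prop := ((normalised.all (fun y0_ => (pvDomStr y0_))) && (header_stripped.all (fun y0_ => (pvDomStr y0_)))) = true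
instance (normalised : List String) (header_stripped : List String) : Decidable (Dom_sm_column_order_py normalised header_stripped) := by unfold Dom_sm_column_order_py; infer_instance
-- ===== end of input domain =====

-- B replaces A's build/find/rebuild phases with one partition pass over enumerate(normalised)
-- (objective: alternative decomposition, same O(n) cost).

-- h.strip().lower() in ("sample_name", "sample", "samplename")
def pvMatchHdr (h : String) : Bool :=
  let k := PySem.Str.lower (PySem.Str.strip h)
  k == "sample_name" || k == "sample" || k == "samplename"

-- ===== PORT A =====
def sm_column_order_py (normalised : List String) (header_stripped : List String) : List Int × List String :=
  let col_indices : List Int :=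
    ((PySem.List.enumerate normalised 0).filter (fun p => p.2 != "filename")).map (fun p => p.1)
  let headers : List String :=
    col_indices.map (fun i => PySem.List.pyGetD header_stripped i "")
  let sn_pos : Option Int :=
    (((PySem.List.enumerate headers 0).filter (fun p => pvMatchHdr p.2)).head?).map (fun p => p.1)
  match sn_pos with
  | some j =>
      if j ≠ 0 then
        let col_indices' : List Int :=
          [PySem.List.pyGetD col_indices j 0] ++
            ((PySem.List.enumerate col_indices 0).filter (fun p => p.1 != j)).map (fun p => p.2)
        (col_indices', col_indices'.map (fun i => PySem.List.pyGetD header_stripped i ""))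
      else (col_indices, headers)
  | none => (col_indices, headers)

-- ===== PORT B =====
-- one step of B's loop body over an enumerate pair
def pvBStep (header_stripped : List String) (acc : Option Int × List Int) (p : Int × String) :
    Option Int × List Int :=
  if p.2 == "filename" then acc
  else
    let header := PySem.List.pyGetD header_stripped p.1 ""
    match acc.1 with
    | none => if pvMatchHdr header then (some p.1, acc.2) else (none, acc.2 ++ [p.1])
    | some s => (some s, acc.2 ++ [p.1])

def sm_column_order_py_alt (normalised : List String) (header_stripped : List String) : List Int × List String :=
  let r := (PySem.List.enumerate normalised 0).foldl (pvBStep header_stripped) (none, [])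
  let col_indices : List Int :=
    match r.1 with
    | some s => s :: r.2
    | none => r.2
  (col_indices, col_indices.map (fun i => PySem.List.pyGetD header_stripped i ""))

-- ===== PRECONDITION & SPEC =====
-- Pre_ excludes exactly the inputs where A raises IndexError: a non-'filename' column
-- whose index is out of range of header_stripped.
def Pre_sm_column_order_py (normalised : List String) (header_stripped : List String) : Prop :=
  ∀ p ∈ PySem.List.enumerate normalised 0, p.2 ≠ "filename" → p.1 < (header_stripped.length : Int)
instance (normalised : List String) (header_stripped : List String) : Decidable (Pre_sm_column_order_py normalised header_stripped) := by unfold Pre_sm_column_order_py; infer_instance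
def pvWitness_sm_column_order_py : List String × List String :=
  (["id", "Sample Name", "filename"], ["id", " sample_name "])

def Spec_sm_column_order_py (normalised : List String) (header_stripped : List String) (out : List Int × List String) : Prop := out = sm_column_order_py_alt normalised header_stripped
instance (normalised : List String) (header_stripped : List String) (out : List Int × List String) : Decidable (Spec_sm_column_order_py normalised header_stripped out) := by unfold Spec_sm_column_order_py; infer_instance

-- ===== CLAIM (what is proved, stated in full; the proofs are below) =====
def Claim_equal_sm_column_order_py : Prop := ∀ (normalised : List String) (header_stripped : List String), Dom_sm_column_order_py normalised header_stripped → Pre_sm_column_order_py normalised header_stripped → Spec_sm_column_order_py normalised header_stripped (sm_column_order_py normalised header_stripped)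

-- ===== LEMMAS AND PROOFS =====

theorem pvWitness_ok :
    Dom_sm_column_order_py pvWitness_sm_column_order_py.1 pvWitness_sm_column_order_py.2 ∧
    Pre_sm_column_order_py pvWitness_sm_column_order_py.1 pvWitness_sm_column_order_py.2 := by
  decide

-- the recursion B's fold implements on the kept (index, column) pairs
def pvGo {α : Type} (q : α → Bool) (v : α → Int) : List α → Option Int × List Int
  | [] => (none, [])
  | a :: t =>
      if q a then (some (v a), t.map v)
      else
        let r := pvGo q v t
        (r.1, v a :: r.2)

theorem pv_head_filter_enum {α : Type} (p : α → Bool) :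
    ∀ (l : List α) (s : Int),
      (((PySem.List.enumerate l s).filter (fun x => p x.2)).head?).map (fun x => x.1) =
        Option.map (fun n : Nat => s + (n : Int)) (l.findIdx? p) := by
  intro l
  induction l with
  | nil => intro s; simp [PySem.List.enumerate]
  | cons a t ih =>
      intro s
      rw [PySem.List.enumerate_cons, List.findIdx?_cons]
      by_cases h : p a = true
      · simp [h]
      · simp only [List.filter_cons, h, Bool.false_eq_true, if_false, ih (s + 1)]
        cases ht : t.findIdx? p with
        | none => simp
        | some n => simp; ring

theorem pv_filter_ne_enum {α : Type} :
    ∀ (l : List α) (s : Int) (n : Nat),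
      ((PySem.List.enumerate l s).filter (fun x => x.1 != s + (n : Int))).map (fun x => x.2) =
        l.eraseIdx n := by
  intro l
  induction l with
  | nil => intro s n; simp [PySem.List.enumerate]
  | cons a t ih =>
      intro s n
      rw [PySem.List.enumerate_cons]
      cases n with
      | zero =>
          simp only [List.filter_cons]
          have h0 : (s != s + ((0 : Nat) : Int)) = false := by simp
          rw [h0]
          simp only [Bool.false_eq_true, if_false, List.eraseIdx_cons_zero]
          have hall : (PySem.List.enumerate t (s + 1)).filter (fun x => x.1 != s + ((0 : Nat) : Int)) =
              PySem.List.enumerate t (s + 1) := by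
            apply List.filter_eq_self.mpr
            intro x hx
            rcases (PySem.List.mem_enumerate_iff t (s + 1) x).mp hx with ⟨k, hk, rfl⟩
            simp only [bne_iff_ne, ne_eq]
            push_cast
            omega
          rw [hall, PySem.List.map_snd_enumerate]
      | succ m =>
          simp only [List.filter_cons]
          have h1 : (s != s + ((m + 1 : Nat) : Int)) = true := by
            simp only [bne_iff_ne, ne_eq]
            push_cast; omega
          rw [h1]
          simp only [if_true, List.map_cons, List.eraseIdx_cons_succ]
          have hcond : (fun (x : Int × α) => x.1 != s + ((m + 1 : Nat) : Int)) =
              (fun (x : Int × α) => x.1 != (s + 1) + (m : Int)) := by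
            funext x
            have : s + ((m + 1 : Nat) : Int) = (s + 1) + (m : Int) := by push_cast; ring
            rw [this]
          rw [hcond, ih (s + 1) m]

-- B's step, with the filename test stripped (the core acting on kept pairs)
def pvCore (header_stripped : List String) (acc : Option Int × List Int) (p : Int × String) :
    Option Int × List Int :=
  match acc.1 with
  | none =>
      if pvMatchHdr (PySem.List.pyGetD header_stripped p.1 "") then (some p.1, acc.2)
      else (none, acc.2 ++ [p.1])
  | some s => (some s, acc.2 ++ [p.1])

theorem pvBStep_eq (hs : List String) :
    pvBStep hs = fun acc p => if (p.2 != "filename") = true then pvCore hs acc p else acc := by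
  funext acc p
  by_cases h : p.2 = "filename"
  · simp [pvBStep, h]
  · simp [pvBStep, pvCore, h]

theorem pv_foldl_core_some (hs : List String) :
    ∀ (l : List (Int × String)) (s : Int) (acc : List Int),
      l.foldl (pvCore hs) (some s, acc) = (some s, acc ++ l.map (fun p => p.1)) := by
  intro l
  induction l with
  | nil => intro s acc; simp
  | cons a t ih =>
      intro s acc
      simp only [List.foldl_cons, pvCore, List.map_cons]
      rw [ih]
      simp

theorem pv_foldl_core_none (hs : List String) :
    ∀ (l : List (Int × String)) (acc : List Int),
      l.foldl (pvCore hs) (none, acc) =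
        ((pvGo (fun p => pvMatchHdr (PySem.List.pyGetD hs p.1 "")) (fun p => p.1) l).1,
          acc ++ (pvGo (fun p => pvMatchHdr (PySem.List.pyGetD hs p.1 "")) (fun p => p.1) l).2) := by
  intro l
  induction l with
  | nil => intro acc; simp [pvGo]
  | cons a t ih =>
      intro acc
      by_cases h : pvMatchHdr (PySem.List.pyGetD hs a.1 "") = true
      · simp only [List.foldl_cons, pvCore, h, if_true, pvGo]
        rw [pv_foldl_core_some]
      · simp only [List.foldl_cons, pvCore, h, Bool.false_eq_true, if_false, pvGo]
        rw [ih]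
        simp

theorem pvGo_none {α : Type} (q : α → Bool) (v : α → Int) :
    ∀ (l : List α), l.findIdx? q = none → pvGo q v l = (none, l.map v) := by
  intro l
  induction l with
  | nil => intro _; rfl
  | cons a t ih =>
      intro h
      rw [List.findIdx?_cons] at h
      by_cases ha : q a = true
      · simp [ha] at h
      · simp only [ha, Bool.false_eq_true, if_false, Option.map_eq_none_iff] at h
        simp [pvGo, ha, ih h]

theorem pvGo_some {α : Type} (q : α → Bool) (v : α → Int) :
    ∀ (l : List α) (n : Nat), l.findIdx? q = some n →
      ∃ hn : n < l.length, pvGo q v l = (some (v l[n]), (l.eraseIdx n).map v) := by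
  intro l
  induction l with
  | nil => intro n h; simp at h
  | cons a t ih =>
      intro n h
      rw [List.findIdx?_cons] at h
      by_cases ha : q a = true
      · simp only [ha, if_true, Option.some.injEq] at h
        subst h
        exact ⟨by simp, by simp [pvGo, ha]⟩
      · simp only [ha, Bool.false_eq_true, if_false] at h
        cases ht : t.findIdx? q with
        | none => rw [ht] at h; simp at h
        | some m =>
            rw [ht] at h
            simp only [Option.map_some, Option.some.injEq] at h
            subst h
            rcases ih m ht with ⟨hm, hgo⟩
            refine ⟨by simpa using Nat.succ_lt_succ hm, ?_⟩
            simp [pvGo, ha, hgo]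

set_option maxHeartbeats 1000000 in
theorem sm_column_order_eq (normalised : List String) (hs : List String) :
    sm_column_order_py normalised hs = sm_column_order_py_alt normalised hs := by
  simp only [sm_column_order_py, sm_column_order_py_alt]
  rw [pvBStep_eq hs, ← List.foldl_filter]
  set lp := (PySem.List.enumerate normalised 0).filter (fun p => p.2 != "filename") with hlp
  set q : Int × String → Bool := fun p => pvMatchHdr (PySem.List.pyGetD hs p.1 "") with hq
  set v : Int × String → Int := fun p => p.1 with hv
  rw [pv_foldl_core_none hs lp, List.nil_append]
  -- A's sn_pos in terms of findIdx?
  have hsn :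
      ((((PySem.List.enumerate ((lp.map v).map (fun i => PySem.List.pyGetD hs i "")) 0).filter
          (fun p => pvMatchHdr p.2)).head?).map (fun p => p.1)) =
        Option.map (fun n : Nat => (0 : Int) + (n : Int)) (lp.findIdx? q) := by
    rw [pv_head_filter_enum pvMatchHdr, List.findIdx?_map, List.findIdx?_map]
    have hcomp : ((pvMatchHdr ∘ fun i => PySem.List.pyGetD hs i "") ∘ v) = q := by
      funext p
      simp [hq, hv, Function.comp]
    rw [hcomp]
  rw [hsn]
  cases hfi : lp.findIdx? q with
  | none =>
      rw [pvGo_none q v lp hfi]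
      simp
  | some n =>
      rcases pvGo_some q v lp n hfi with ⟨hn, hgo⟩
      rw [hgo]
      simp only [Option.map_some]
      cases n with
      | zero =>
          simp only [Nat.cast_zero, ne_eq]
          match lp, hn with
          | p :: t, _ => simp [v]
      | succ m =>
          have hne : ((0 : Int) + ((m + 1 : Nat) : Int)) ≠ 0 := by push_cast; omega
          have hget : PySem.List.pyGetD (lp.map v) ((0 : Int) + ((m + 1 : Nat) : Int)) 0 =
              v lp[m + 1] := by
            have h1 : ((0 : Int) + ((m + 1 : Nat) : Int)) = (((m + 1 : Nat) : Int)) := by push_cast; ring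
            rw [h1, PySem.List.pyGetD_natCast]
            rw [List.getD_eq_getElem _ _ (by simpa using hn)]
            simp
          have herase :
              ((PySem.List.enumerate (lp.map v) 0).filter
                  (fun p => p.1 != (0 : Int) + ((m + 1 : Nat) : Int))).map (fun p => p.2) =
                (lp.eraseIdx (m + 1)).map v := by
            rw [pv_filter_ne_enum (lp.map v) 0 (m + 1), List.eraseIdx_map]
          simp only [List.singleton_append, ne_eq, hne, not_false_eq_true,
            if_true, hget, herase]

-- ===== VERDICT (by name: the statement is the Claim_ definition above) =====
theorem sm_column_order_py_spec : Claim_equal_sm_column_order_py := by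
  intro normalised header_stripped _ _
  unfold Spec_sm_column_order_py
  exact sm_column_order_eq normalised header_stripped
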